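-- pv_equiv track=rewrite | github.com/matheuslemesam/Nexo | server/services/elevenlabs_service.py | _format_list_for_speech
-- ===== SOURCE A (Python) =====
-- def _format_list_for_speech(items: list) -> str:
--     """
--     Format a list of items for natural speech
--
--     Args:
--         items: List of items to format
--
--     Returns:
--         Formatted string for speech
--     """
--     if not items:
--         return ""
--
--     if len(items) == 1:
--         return items[0]
--     elif len(items) == 2:
--         return f"{items[0]} and {items[1]}"
--     else:
--         formatted_items = []
--         for i, item in enumerate(items):
--             if i == len(items) - 1:
--                 formatted_items.append(f"and {item}")
--             else:
--                 formatted_items.append(item)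
--         return ", ".join(formatted_items)
-- ===== SOURCE B (Python) =====
-- def _format_list_for_speech(items: list) -> str:
--     if not items:
--         return ""
--     if len(items) == 1:
--         return items[0]
--     if len(items) == 2:
--         return items[0] + " and " + items[1]
--     out = items[0]
--     for item in items[1:-1]:
--         out += ", " + item
--     out += ", and " + items[-1]
--     return out
-- ===== Notes on version B (the rewrite author's own statement) =====
-- stated objective: simpler
-- what changed: The length>=3 case drops the enumerate loop with its last-index equality branch and the intermediate list+join: B accumulates the result string directly, folding ', ' + item over the middle slice items[1:-1] and appending ', and ' + items[-1] once at the end.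
import Mathlib
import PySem

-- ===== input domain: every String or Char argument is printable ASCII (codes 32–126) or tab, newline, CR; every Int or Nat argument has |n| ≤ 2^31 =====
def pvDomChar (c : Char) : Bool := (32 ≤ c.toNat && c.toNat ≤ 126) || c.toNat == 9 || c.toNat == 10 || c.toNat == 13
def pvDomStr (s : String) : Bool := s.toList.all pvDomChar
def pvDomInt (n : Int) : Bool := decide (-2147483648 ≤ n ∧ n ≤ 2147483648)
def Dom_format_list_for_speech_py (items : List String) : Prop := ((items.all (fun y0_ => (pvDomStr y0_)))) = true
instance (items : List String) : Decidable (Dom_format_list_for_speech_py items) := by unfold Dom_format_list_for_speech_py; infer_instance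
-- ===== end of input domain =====

-- B's length>=3 case accumulates the result string directly over items[1:-1], with no intermediate list, enumerate or join (simpler; same cost).

-- ===== PORT A =====
def format_list_for_speech_py (items : List String) : String :=
  if items.isEmpty then ""
  else if items.length == 1 then PySem.List.pyGetD items 0 ""
  else if items.length == 2 then
    PySem.List.pyGetD items 0 "" ++ " and " ++ PySem.List.pyGetD items 1 ""
  else
    let formatted_items :=
      (PySem.List.enumerate items 0).foldl
        (fun acc p => if p.1 == (items.length : Int) - 1 then acc ++ ["and " ++ p.2]
                      else acc ++ [p.2]) []
    PySem.Str.join ", " formatted_items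

-- ===== PORT B =====
def format_list_for_speech_py_alt (items : List String) : String :=
  match items with
  | [] => ""
  | [a] => a
  | [a, b] => a ++ " and " ++ b
  | _ =>
    let out := PySem.List.pyGetD items 0 ""
    let out := (PySem.List.slice items (some 1) (some (-1))).foldl
                 (fun out item => out ++ ", " ++ item) out
    out ++ ", and " ++ PySem.List.pyGetD items (-1) ""

-- ===== PRECONDITION & SPEC =====
def Spec_format_list_for_speech_py (items : List String) (out : String) : Prop := out = format_list_for_speech_py_alt items
instance (items : List String) (out : String) : Decidable (Spec_format_list_for_speech_py items out) := by unfold Spec_format_list_for_speech_py; infer_instance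

-- ===== CLAIM (what is proved, stated in full; the proofs are below) =====
def Claim_equal_format_list_for_speech_py : Prop := ∀ (items : List String), Dom_format_list_for_speech_py items → Spec_format_list_for_speech_py items (format_list_for_speech_py items)

-- ===== LEMMAS AND PROOFS =====

-- A's loop over enumerate builds dropLast ++ ["and " ++ last]
lemma foldA_enum (n : Int) (y : String) (ys : List String) (s : Int) (acc : List String)
    (h : s + ((ys.length : Int) + 1) = n) :
    (PySem.List.enumerate (y :: ys) s).foldl
      (fun acc p => if p.1 == n - 1 then acc ++ ["and " ++ p.2] else acc ++ [p.2]) acc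
    = acc ++ (y :: ys).dropLast ++ ["and " ++ (y :: ys).getLast (by simp)] := by
  induction ys generalizing y s acc with
  | nil =>
      have hs : (s == n - 1) = true := by simp only [beq_iff_eq]; simp at h; omega
      simp only [PySem.List.enumerate_cons, PySem.List.enumerate_nil, List.foldl_cons,
        List.foldl_nil, hs, if_true]
      simp
  | cons z zs ih =>
      have hs : (s == n - 1) = false := by
        simp only [beq_eq_false_iff_ne, ne_eq]; simp at h; omega
      rw [PySem.List.enumerate_cons]
      simp only [List.foldl_cons, hs, Bool.false_eq_true, if_false]
      rw [ih z (s + 1) (acc ++ [y]) (by simp at h ⊢; omega)]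
      simp

-- B's string accumulator over mid equals the comma-join of acc :: mid
lemma foldB_join (mid : List String) (a : String) :
    mid.foldl (fun out item => out ++ ", " ++ item) a = PySem.Str.join ", " (a :: mid) := by
  induction mid generalizing a with
  | nil =>
      rw [← String.toList_inj]
      simp [PySem.Str.toList_join, PySem.Chars.join_singleton]
  | cons m ms ih =>
      rw [List.foldl_cons, ih (a ++ ", " ++ m), ← String.toList_inj]
      simp only [PySem.Str.toList_join, List.map_cons, String.toList_append]
      cases ms with
      | nil => simp [PySem.Chars.join_singleton, PySem.Chars.join_cons_cons]
      | cons w ws => simp [PySem.Chars.join_cons_cons]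

-- join of (w :: ws) ++ [z] appends "sep ++ z"
lemma joinC_append_last (sep w z : List Char) (ws : List (List Char)) :
    PySem.Chars.join sep ((w :: ws) ++ [z]) = PySem.Chars.join sep (w :: ws) ++ sep ++ z := by
  induction ws generalizing w with
  | nil => simp [PySem.Chars.join_cons_cons, PySem.Chars.join_singleton]
  | cons v vs ih =>
      simp only [List.cons_append, PySem.Chars.join_cons_cons]
      rw [show v :: (vs ++ [z]) = (v :: vs) ++ [z] from rfl, ih v]
      simp

-- items[1:-1] of a :: xs is xs.dropLast
lemma slice_one_neg_one (a : String) (xs : List String) :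
    PySem.List.slice (a :: xs) (some 1) (some (-1)) = xs.dropLast := by
  rw [show ((-1 : Int)) = -((1 : Nat) : Int) from rfl]
  rw [show ((1 : Int)) = ((1 : Nat) : Int) from rfl]
  simp [PySem.List.slice, PySem.List.clampIdx, List.dropLast_eq_take]
  have h : ¬ ((xs.length : Int) < 0) := by omega
  simp [h]

-- ===== VERDICT (by name: the statement is the Claim_ definition above) =====
theorem format_list_for_speech_py_spec : Claim_equal_format_list_for_speech_py := by
  intro items _
  unfold Spec_format_list_for_speech_py format_list_for_speech_py format_list_for_speech_py_alt
  match items with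
  | [] => rfl
  | [a] => rfl
  | [a, b] => rfl
  | a :: b :: c :: rest =>
      have h1 : ((a :: b :: c :: rest).isEmpty) = false := rfl
      have h2 : ((a :: b :: c :: rest).length == 1) = false := by simp
      have h3 : ((a :: b :: c :: rest).length == 2) = false := by simp
      simp only [h1, h2, h3, Bool.false_eq_true, if_false]
      rw [foldA_enum ((a :: b :: c :: rest).length : Int) a (b :: c :: rest) 0 [] (by simp)]
      rw [List.nil_append, slice_one_neg_one, foldB_join,
        PySem.List.pyGetD_neg_one _ _ (by simp)]
      rw [show (a :: b :: c :: rest).dropLast = a :: (b :: c :: rest).dropLast from rfl]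
      rw [show PySem.List.pyGetD (a :: b :: c :: rest) 0 "" = a by
        simp [PySem.List.pyGetD]]
      rw [← String.toList_inj]
      simp only [String.toList_append, PySem.Str.toList_join, List.map_append, List.map_cons,
        List.map_nil]
      rw [joinC_append_last]
      simp
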